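-- pv_equiv track=rewrite | github.com/keli/sf6-toolbox | build_official_overrides.py | active_segments_to_fat_expr
-- ===== SOURCE A (Python) =====
-- def active_segments_to_fat_expr(segments: list[tuple[int, int]]) -> str | None:
--     if not segments:
--         return None
--     expr = ""
--     prev_end: int | None = None
--     for i, (start, end) in enumerate(segments):
--         length = end - start + 1
--         if length <= 0:
--             return None
--         if i == 0:
--             expr = str(length)
--             prev_end = end
--             continue
--         if prev_end is None:
--             return None
--         gap = start - prev_end - 1
--         if gap < 0:
--             return None
--         expr += f"({gap}){length}"
--         prev_end = end
--     return expr
-- ===== SOURCE B (Python) =====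
-- def active_segments_to_fat_expr(segments: list[tuple[int, int]]) -> str | None:
--     if not segments:
--         return None
--     start, end = segments[0]
--     length = end - start + 1
--     if length <= 0:
--         return None
--     tail = _tail_expr(end, segments[1:])
--     if tail is None:
--         return None
--     return str(length) + tail
--
--
-- def _tail_expr(prev_end: int, rest: list[tuple[int, int]]) -> str | None:
--     """Recursively render the remaining segments, given the previous segment's end."""
--     if not rest:
--         return ""
--     start, end = rest[0]
--     length = end - start + 1
--     gap = start - prev_end - 1
--     if length <= 0 or gap < 0:
--         return None
--     tail = _tail_expr(end, rest[1:])
--     if tail is None: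
--         return None
--     return f"({gap}){length}" + tail
-- ===== Notes on version B (the rewrite author's own statement) =====
-- stated objective: alternative
-- what changed: Replaces A's single indexed loop with prev_end state and forward string accumulation by structural recursion on the segment list: a recursive helper renders the tail (suffix built first, concatenated back-to-front), with no index, no accumulator and no optional prev_end state.
import Mathlib
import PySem

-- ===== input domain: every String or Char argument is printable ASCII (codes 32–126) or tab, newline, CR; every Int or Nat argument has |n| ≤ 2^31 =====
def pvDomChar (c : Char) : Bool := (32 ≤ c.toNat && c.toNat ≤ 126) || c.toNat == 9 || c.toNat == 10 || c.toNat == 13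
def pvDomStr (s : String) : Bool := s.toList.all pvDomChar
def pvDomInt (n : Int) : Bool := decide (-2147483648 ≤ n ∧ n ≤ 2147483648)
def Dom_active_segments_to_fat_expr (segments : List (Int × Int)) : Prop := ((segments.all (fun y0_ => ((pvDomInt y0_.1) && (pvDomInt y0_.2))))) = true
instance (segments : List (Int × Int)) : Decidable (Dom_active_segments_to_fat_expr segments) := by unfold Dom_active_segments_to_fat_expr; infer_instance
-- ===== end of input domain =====

-- B replaces A's indexed loop with prev_end state and forward accumulation by structural
-- recursion on the list, building the string suffix-first (objective: alternative).


-- ===== PORT A =====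
-- loop body of A: state = none once an early `return None` fired, else (expr, prev_end)
def pvStepA (st : Option (String × Option Int)) (p : Int × (Int × Int)) :
    Option (String × Option Int) :=
  match st with
  | none => none
  | some (expr, prevEnd) =>
    let i := p.1
    let start := p.2.1
    let e := p.2.2
    let length := e - start + 1
    if length ≤ 0 then none
    else if i = 0 then some (PySem.Int.toStr length, some e)
    else
      match prevEnd with
      | none => none
      | some pe =>
        let gap := start - pe - 1
        if gap < 0 then none
        else some (expr ++ "(" ++ PySem.Int.toStr gap ++ ")" ++ PySem.Int.toStr length, some e)

def active_segments_to_fat_expr (segments : List (Int × Int)) : Option String :=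
  if segments = [] then none
  else
    match (PySem.List.enumerate segments).foldl pvStepA (some ("", none)) with
    | none => none
    | some (expr, _) => some expr

-- ===== PORT B =====
-- recursive helper of B: renders the remaining segments given the previous segment's end
def pvTailExpr (prevEnd : Int) : List (Int × Int) → Option String
  | [] => some ""
  | (s, e) :: t =>
    let length := e - s + 1
    let gap := s - prevEnd - 1
    if length ≤ 0 ∨ gap < 0 then none
    else
      match pvTailExpr e t with
      | none => none
      | some tail => some ("(" ++ PySem.Int.toStr gap ++ ")" ++ PySem.Int.toStr length ++ tail)

def active_segments_to_fat_expr_alt (segments : List (Int × Int)) : Option String :=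
  match segments with
  | [] => none
  | (s, e) :: rest =>
    let length := e - s + 1
    if length ≤ 0 then none
    else
      match pvTailExpr e rest with
      | none => none
      | some tail => some (PySem.Int.toStr length ++ tail)

-- ===== PRECONDITION & SPEC =====
def Spec_active_segments_to_fat_expr (segments : List (Int × Int)) (out : Option String) : Prop := out = active_segments_to_fat_expr_alt segments
instance (segments : List (Int × Int)) (out : Option String) : Decidable (Spec_active_segments_to_fat_expr segments out) := by unfold Spec_active_segments_to_fat_expr; infer_instance

-- ===== CLAIM (what is proved, stated in full; the proofs are below) =====
def Claim_equal_active_segments_to_fat_expr : Prop := ∀ (segments : List (Int × Int)), Dom_active_segments_to_fat_expr segments → Spec_active_segments_to_fat_expr segments (active_segments_to_fat_expr segments)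

-- ===== LEMMAS AND PROOFS =====

theorem pvFoldA_none (l : List (Int × (Int × Int))) :
    l.foldl pvStepA none = none := by
  induction l with
  | nil => rfl
  | cons h t ih => simpa [pvStepA] using ih

-- A's loop tail, started after the first segment, computes B's recursive tail prefixed by expr
theorem pvFoldA_tail (rest : List (Int × Int)) :
    ∀ (k : Int), 1 ≤ k → ∀ (expr : String) (pe : Int),
    ((PySem.List.enumerate rest k).foldl pvStepA (some (expr, some pe))).map Prod.fst
      = (pvTailExpr pe rest).map (fun suf => expr ++ suf) := by
  induction rest with
  | nil => intro k hk expr pe; simp [PySem.List.enumerate, pvTailExpr]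
  | cons p t ih =>
    intro k hk expr pe
    obtain ⟨s, e⟩ := p
    rw [PySem.List.enumerate_cons]
    simp only [List.foldl_cons, pvStepA, pvTailExpr]
    have hk0 : ¬ (k = 0) := by omega
    by_cases h1 : e - s + 1 ≤ 0
    · simp [h1, pvFoldA_none]
    · by_cases h2 : s - pe - 1 < 0
      · simp [h1, h2, hk0, pvFoldA_none]
      · simp only [if_neg h1, if_neg hk0, if_neg h2, if_neg (by tauto : ¬(e - s + 1 ≤ 0 ∨ s - pe - 1 < 0))]
        rw [ih (k+1) (by omega)]
        cases pvTailExpr e t with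
        | none => simp
        | some r => simp [String.append_assoc]

-- ===== VERDICT (by name: the statement is the Claim_ definition above) =====
theorem active_segments_to_fat_expr_spec : Claim_equal_active_segments_to_fat_expr := by
  intro segments _
  unfold Spec_active_segments_to_fat_expr active_segments_to_fat_expr active_segments_to_fat_expr_alt
  match segments with
  | [] => rfl
  | (s0, e0) :: rest =>
    simp only [if_neg (List.cons_ne_nil _ _)]
    rw [PySem.List.enumerate_cons]
    simp only [List.foldl_cons, pvStepA]
    by_cases h0 : e0 - s0 + 1 ≤ 0
    · simp [h0, pvFoldA_none]
    · have hfa := pvFoldA_tail rest 1 le_rfl (PySem.Int.toStr (e0 - s0 + 1)) e0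
      simp only [h0, if_false, zero_add, if_true] at hfa ⊢
      cases hfold : (PySem.List.enumerate rest 1).foldl pvStepA
          (some (PySem.Int.toStr (e0 - s0 + 1), some e0)) with
      | none =>
        rw [hfold] at hfa
        cases htail : pvTailExpr e0 rest with
        | none => rfl
        | some v => rw [htail] at hfa; simp at hfa
      | some v =>
        rw [hfold] at hfa
        cases htail : pvTailExpr e0 rest with
        | none => rw [htail] at hfa; simp at hfa
        | some w =>
          rw [htail] at hfa
          simp at hfa ⊢
          exact hfa
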